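-- pv_equiv track=rewrite | github.com/fanhillary/shop-better | scrape_product.py | build_css_selector
-- ===== SOURCE A (Python) =====
-- def build_css_selector(important, ignore):
--     """ build css selector string for beautifulsoup to parse pertinent elements
--     Params: important - array of words to look for elements with a class that includes the word in important
--             ignore - array of words to ignore elements with this word in it's class
--     Returns: selector string for searching elements that include important class and don't have ignore class
--     """
--     attributes = ['class', 'data-at', 'id']
--     selector = ""
--     for word in important:
--         for attr in attributes:
--             selector += "[" + attr +"*='" + word + "']"
--             for ignore_word in ignore:
--                 selector += ":not([" + attr + "*='" + ignore_word + "'])"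
--             selector += ", "
--
--     return selector[:-2]
-- ===== SOURCE B (Python) =====
-- def build_css_selector(important, ignore):
--     """ build css selector string for beautifulsoup to parse pertinent elements """
--     attributes = ['class', 'data-at', 'id']
--     suffix = {attr: "".join(":not([" + attr + "*='" + iw + "'])" for iw in ignore)
--               for attr in attributes}
--     parts = ["[" + attr + "*='" + word + "']" + suffix[attr]
--              for word in important for attr in attributes]
--     return ", ".join(parts)
-- ===== Notes on version B (the rewrite author's own statement) =====
-- stated objective: simpler
-- what changed: Replaces the accumulator string with trailing-separator trimming ([:-2]) by a precomputed per-attribute ignore-suffix table plus a comprehension of selector parts joined with ', '.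
import Mathlib
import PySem

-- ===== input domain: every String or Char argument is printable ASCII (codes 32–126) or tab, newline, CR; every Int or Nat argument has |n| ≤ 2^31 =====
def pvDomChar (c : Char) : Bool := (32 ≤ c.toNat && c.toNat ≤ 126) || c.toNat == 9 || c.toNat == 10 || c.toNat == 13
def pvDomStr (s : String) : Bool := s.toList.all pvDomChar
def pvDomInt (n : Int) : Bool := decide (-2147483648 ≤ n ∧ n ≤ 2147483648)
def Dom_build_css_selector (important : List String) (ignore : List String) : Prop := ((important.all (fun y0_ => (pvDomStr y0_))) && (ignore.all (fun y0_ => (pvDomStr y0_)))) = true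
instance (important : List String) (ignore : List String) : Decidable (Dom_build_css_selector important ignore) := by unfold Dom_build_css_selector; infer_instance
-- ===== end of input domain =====

-- B replaces A's accumulator string with its trailing ", " sliced off by a precomputed
-- per-attribute ignore-suffix table, a list of selector parts and a single ", ".join.
-- String concatenation/slicing/join are ported on List Char (PySem.Chars); Lean's own
-- String.append is not used inside the computation.

-- ===== PORT A =====
def pvAttrs : List (List Char) := ["class".toList, "data-at".toList, "id".toList]

def build_css_selector (important : List String) (ignore : List String) : String :=
  let selector : List Char :=
    important.foldl (fun selector word =>
      pvAttrs.foldl (fun selector attr =>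
        let selector := selector ++ "[".toList ++ attr ++ "*='".toList ++ word.toList ++ "']".toList
        let selector := ignore.foldl (fun selector ignore_word =>
          selector ++ ":not([".toList ++ attr ++ "*='".toList ++ ignore_word.toList ++ "'])".toList) selector
        selector ++ ", ".toList) selector) []
  String.ofList (PySem.List.slice selector none (some (-2)))

-- ===== PORT B =====
def pvIgnoreSuffix (attr : List Char) (ignore : List String) : List Char :=
  PySem.Chars.join [] (ignore.map (fun iw =>
    ":not([".toList ++ attr ++ "*='".toList ++ iw.toList ++ "'])".toList))

def build_css_selector_alt (important : List String) (ignore : List String) : String :=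
  let suffix : PySem.Dict (List Char) (List Char) :=
    PySem.Dict.mk (pvAttrs.map (fun attr => (attr, pvIgnoreSuffix attr ignore)))
  let parts : List (List Char) :=
    important.flatMap (fun word =>
      pvAttrs.map (fun attr =>
        "[".toList ++ attr ++ "*='".toList ++ word.toList ++ "']".toList ++ suffix.getD attr []))
  String.ofList (PySem.Chars.join ", ".toList parts)

-- ===== PRECONDITION & SPEC =====
def Spec_build_css_selector (important : List String) (ignore : List String) (out : String) : Prop := out = build_css_selector_alt important ignore
instance (important : List String) (ignore : List String) (out : String) : Decidable (Spec_build_css_selector important ignore out) := by unfold Spec_build_css_selector; infer_instance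

-- ===== CLAIM (what is proved, stated in full; the proofs are below) =====
def Claim_equal_build_css_selector : Prop := ∀ (important : List String) (ignore : List String), Dom_build_css_selector important ignore → Spec_build_css_selector important ignore (build_css_selector important ignore)

-- ===== LEMMAS AND PROOFS =====

-- one selector part: "[attr*='word']" followed by the ignore suffix
def pvPart (ignore : List String) (attr : List Char) (word : String) : List Char :=
  "[".toList ++ attr ++ "*='".toList ++ word.toList ++ "']".toList ++ pvIgnoreSuffix attr ignore

def pvParts (important : List String) (ignore : List String) : List (List Char) :=
  important.flatMap (fun word => pvAttrs.map (fun attr => pvPart ignore attr word))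

theorem pv_join_nil_eq_flatten (l : List (List Char)) :
    PySem.Chars.join [] l = l.flatten := by
  induction l with
  | nil => simp [PySem.Chars.join_nil]
  | cons p rest ih =>
    cases rest with
    | nil => simp [PySem.Chars.join_singleton]
    | cons q r => rw [PySem.Chars.join_cons_cons]; simp_all

theorem pv_ign_fold (ignore : List String) (attr acc : List Char) :
    ignore.foldl (fun selector ignore_word =>
      selector ++ ":not([".toList ++ attr ++ "*='".toList ++ ignore_word.toList ++ "'])".toList) acc
    = acc ++ pvIgnoreSuffix attr ignore := by
  induction ignore generalizing acc with
  | nil => simp [pvIgnoreSuffix, PySem.Chars.join_nil]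
  | cons iw rest ih =>
    simp only [List.foldl_cons]
    rw [ih]
    simp [pvIgnoreSuffix, pv_join_nil_eq_flatten, List.append_assoc]

theorem pv_attr_fold (ignore : List String) (word : String) (acc : List Char) :
    pvAttrs.foldl (fun selector attr =>
        let selector := selector ++ "[".toList ++ attr ++ "*='".toList ++ word.toList ++ "']".toList
        let selector := ignore.foldl (fun selector ignore_word =>
          selector ++ ":not([".toList ++ attr ++ "*='".toList ++ ignore_word.toList ++ "'])".toList) selector
        selector ++ ", ".toList) acc
    = acc ++ (pvAttrs.flatMap (fun attr => pvPart ignore attr word ++ ", ".toList)) := by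
  simp only [pvAttrs, List.foldl_cons, List.foldl_nil, List.flatMap_cons, List.flatMap_nil]
  rw [pv_ign_fold, pv_ign_fold, pv_ign_fold]
  simp [pvPart, List.append_assoc]

theorem pv_outer_fold (important ignore : List String) (acc : List Char) :
    important.foldl (fun selector word =>
      pvAttrs.foldl (fun selector attr =>
        let selector := selector ++ "[".toList ++ attr ++ "*='".toList ++ word.toList ++ "']".toList
        let selector := ignore.foldl (fun selector ignore_word =>
          selector ++ ":not([".toList ++ attr ++ "*='".toList ++ ignore_word.toList ++ "'])".toList) selector
        selector ++ ", ".toList) selector) acc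
    = acc ++ (pvParts important ignore).flatMap (fun p => p ++ ", ".toList) := by
  induction important generalizing acc with
  | nil => simp [pvParts]
  | cons w rest ih =>
    simp only [List.foldl_cons]
    rw [pv_attr_fold, ih]
    simp [pvParts, List.append_assoc, List.flatMap_append, List.flatMap_map]

theorem pv_flat_trailing (sep : List Char) (p : List Char) (parts : List (List Char)) :
    (p :: parts).flatMap (fun x => x ++ sep) = PySem.Chars.join sep (p :: parts) ++ sep := by
  induction parts generalizing p with
  | nil => simp [PySem.Chars.join_singleton]
  | cons q r ih =>
    rw [PySem.Chars.join_cons_cons]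
    simp only [List.flatMap_cons] at *
    rw [ih q]
    simp [List.append_assoc]

theorem pv_slice_trailing (parts : List (List Char)) :
    PySem.List.slice (parts.flatMap (fun p => p ++ ", ".toList)) none (some (-2))
    = PySem.Chars.join ", ".toList parts := by
  rw [PySem.List.slice_to_neg_ofNat _ 2 (by omega)]
  cases parts with
  | nil => simp [PySem.Chars.join_nil]
  | cons p rest =>
    rw [pv_flat_trailing]
    have : (PySem.Chars.join ", ".toList (p :: rest) ++ ", ".toList).length - 2
        = (PySem.Chars.join ", ".toList (p :: rest)).length := by
      simp
    rw [this]
    exact List.take_left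

theorem pv_alt_eq (important ignore : List String) :
    build_css_selector_alt important ignore
    = String.ofList (PySem.Chars.join ", ".toList (pvParts important ignore)) := by
  simp only [build_css_selector_alt, pvParts, pvPart, pvAttrs, List.map_cons, List.map_nil]
  rfl

-- ===== VERDICT (by name: the statement is the Claim_ definition above) =====
theorem build_css_selector_spec : Claim_equal_build_css_selector := by
  intro important ignore _
  show build_css_selector important ignore = build_css_selector_alt important ignore
  rw [pv_alt_eq]
  simp only [build_css_selector]
  rw [pv_outer_fold, List.nil_append, pv_slice_trailing]
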